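-- pv_equiv track=rewrite | github.com/Sineton/drilling_database_api | app/services/detail_actual_operations_import_service.py | _resolve_well_number
-- ===== SOURCE A (Python) =====
-- from typing import Any, Dict, List, Optional, Tuple
--
-- def _resolve_well_number(rows: List[Dict[str, Any]]) -> Optional[str]:
--     well_numbers = {
--         row["well_number"]
--         for row in rows
--         if row.get("well_number")
--     }
--     if len(well_numbers) == 1:
--         return next(iter(well_numbers))
--     return None
-- ===== SOURCE B (Python) =====
-- from typing import Any, Dict, List, Optional
--
-- def _resolve_well_number(rows: List[Dict[str, Any]]) -> Optional[str]:
--     found = None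
--     for row in rows:
--         value = row.get("well_number")
--         if not value:
--             continue
--         if found is None:
--             found = value
--         elif value != found:
--             return None
--     return found
-- ===== Notes on version B (the rewrite author's own statement) =====
-- stated objective: simpler
-- what changed: Single pass keeping one scalar candidate with early exit on a second distinct truthy value, instead of materialising a set and inspecting its size.
import Mathlib
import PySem

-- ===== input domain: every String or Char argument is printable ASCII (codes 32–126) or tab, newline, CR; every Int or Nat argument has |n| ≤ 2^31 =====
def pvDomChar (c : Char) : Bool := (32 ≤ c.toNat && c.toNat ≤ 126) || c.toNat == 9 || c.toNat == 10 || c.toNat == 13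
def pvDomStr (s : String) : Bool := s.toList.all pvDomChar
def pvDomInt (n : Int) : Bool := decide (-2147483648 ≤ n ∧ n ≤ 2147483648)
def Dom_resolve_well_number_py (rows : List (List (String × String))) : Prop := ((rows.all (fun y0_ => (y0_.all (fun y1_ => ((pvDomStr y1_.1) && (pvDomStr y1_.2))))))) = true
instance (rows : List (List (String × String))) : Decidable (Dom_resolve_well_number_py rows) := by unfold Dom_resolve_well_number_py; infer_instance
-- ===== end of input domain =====

-- ===== PORT A =====
-- B replaces A's set accumulation with a single scalar candidate and early exit (simpler).
-- step of A's set comprehension: add row["well_number"] when row.get("well_number") is truthy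
def pvStepA (s : PySem.Set String) (row : List (String × String)) : PySem.Set String :=
  match row.lookup "well_number" with
  | none => s
  | some v => if v = "" then s else PySem.Set.add s v

def resolve_well_number_py (rows : List (List (String × String))) : Option String :=
  let well_numbers : PySem.Set String := rows.foldl pvStepA PySem.Set.empty
  if PySem.Set.len well_numbers = 1 then well_numbers.head? else none

-- ===== PORT B =====
def pvAltGo : List (List (String × String)) → Option String → Option String
  | [], found => found
  | row :: rest, found =>
    match row.lookup "well_number" with
    | none => pvAltGo rest found
    | some v =>
      if v = "" then pvAltGo rest found
      else
        match found with
        | none => pvAltGo rest (some v)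
        | some f => if v = f then pvAltGo rest found else none

def resolve_well_number_py_alt (rows : List (List (String × String))) : Option String :=
  pvAltGo rows none

-- ===== PRECONDITION & SPEC =====
def Spec_resolve_well_number_py (rows : List (List (String × String))) (out : Option String) : Prop := out = resolve_well_number_py_alt rows
instance (rows : List (List (String × String))) (out : Option String) : Decidable (Spec_resolve_well_number_py rows out) := by unfold Spec_resolve_well_number_py; infer_instance

-- ===== CLAIM (what is proved, stated in full; the proofs are below) =====
def Claim_equal_resolve_well_number_py : Prop := ∀ (rows : List (List (String × String))), Dom_resolve_well_number_py rows → Spec_resolve_well_number_py rows (resolve_well_number_py rows)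

-- ===== LEMMAS AND PROOFS =====

theorem mem_foldl_stepA (rows : List (List (String × String))) (s : PySem.Set String)
    (x : String) (hx : x ∈ s) : x ∈ rows.foldl pvStepA s := by
  induction rows generalizing s with
  | nil => exact hx
  | cons row rest ih =>
    apply ih
    unfold pvStepA
    cases row.lookup "well_number" with
    | none => exact hx
    | some v =>
      by_cases hv : v = ""
      · simp [hv, hx]
      · simp [hv, PySem.Set.mem_add, hx]

theorem altGo_some (rows : List (List (String × String))) (f : String) :
    pvAltGo rows (some f) =
      (if PySem.Set.len (rows.foldl pvStepA [f]) = 1 then (rows.foldl pvStepA [f]).head? else none) := by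
  induction rows generalizing f with
  | nil => simp [pvAltGo, PySem.Set.len]
  | cons row rest ih =>
    unfold pvAltGo
    cases hget : row.lookup "well_number" with
    | none => simp [List.foldl_cons, pvStepA, hget, ih f]
    | some v =>
      by_cases hv : v = ""
      · simp [List.foldl_cons, pvStepA, hget, hv, ih f]
      · by_cases hvf : v = f
        · have hadd : pvStepA [f] row = [f] := by
            simp [pvStepA, hget, hvf, PySem.Set.add_of_mem]
          simp [List.foldl_cons, hadd, hvf, ih f]
        · have hnm : v ∉ ([f] : List String) := by simp [hvf]
          have hadd : pvStepA [f] row = [f, v] := by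
            simp [pvStepA, hget, hv, PySem.Set.add_of_not_mem hnm]
          have hf : f ∈ rest.foldl pvStepA [f, v] :=
            mem_foldl_stepA rest [f, v] f (by simp)
          have hvmem : v ∈ rest.foldl pvStepA [f, v] :=
            mem_foldl_stepA rest [f, v] v (by simp)
          have hne : (rest.foldl pvStepA [f, v]).length ≠ 1 := by
            intro h1
            obtain ⟨x, hx⟩ := List.length_eq_one_iff.mp h1
            rw [hx] at hf hvmem
            simp at hf hvmem
            exact hvf (hvmem.trans hf.symm)
          simp [List.foldl_cons, hadd, hv, hvf, PySem.Set.len, hne]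

theorem resolve_eq (rows : List (List (String × String))) :
    resolve_well_number_py rows = resolve_well_number_py_alt rows := by
  unfold resolve_well_number_py resolve_well_number_py_alt
  induction rows with
  | nil => simp [pvAltGo, PySem.Set.len, PySem.Set.empty]
  | cons row rest ih =>
    unfold pvAltGo
    cases hget : row.lookup "well_number" with
    | none => simpa [List.foldl_cons, pvStepA, hget] using ih
    | some v =>
      by_cases hv : v = ""
      · simpa [List.foldl_cons, pvStepA, hget, hv] using ih
      · have hadd : pvStepA [] row = [v] := by
          simp [pvStepA, hget, hv, PySem.Set.add]
        simp [PySem.Set.empty, PySem.Set.len, List.foldl_cons, hadd, hv, altGo_some rest v]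

-- ===== VERDICT (by name: the statement is the Claim_ definition above) =====
theorem resolve_well_number_py_spec : Claim_equal_resolve_well_number_py := by
  intro rows _
  unfold Spec_resolve_well_number_py
  exact resolve_eq rows
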